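-- pv_equiv track=rewrite | github.com/ukm2020/VibeQA | src/frameworks/rainforest_simple.py | _extract_core_flow
-- ===== SOURCE A (Python) =====
-- def _extract_core_flow(steps: list) -> list:
--     """Extract the absolute core flow (max 4 steps)."""
--     core = []
--
--     # Find key actions only
--     has_navigation = False
--     has_form_fill = False
--     has_submission = False
--     has_validation = False
--
--     for step in steps:
--         action = step['action']
--
--         # 1. Navigation (if present)
--         if action == 'navigate' and not has_navigation:
--             core.append("Go to the login page")
--             has_navigation = True
--
--         # 2. Form filling (combine all inputs)
--         elif action == 'type' and not has_form_fill:
--             core.append("Enter invalid login credentials")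
--             has_form_fill = True
--
--         # 3. Submission
--         elif action == 'click' and 'submit' in step.get('selector', '').lower() and not has_submission:
--             core.append("Submit the form")
--             has_submission = True
--
--         # 4. Validation (any assertion)
--         elif action.startswith('assert_') and not has_validation:
--             if 'text' in action:
--                 text = step.get('value', 'error')
--                 core.append(f"Check error message contains '{text}'")
--             else:
--                 core.append("Verify error message appears")
--             has_validation = True
--
--         # Stop at 4 steps
--         if len(core) >= 4:
--             break
--
--     # Ensure we have at least the basics
--     if not has_navigation:
--         core.insert(0, "Go to the application")
--     if not has_validation and len(core) < 4:
--         core.append("Verify error is shown")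
--
--     return core[:4]  # Absolute max 4 steps
-- ===== SOURCE B (Python) =====
-- def _extract_core_flow(steps: list) -> list:
--     """Extract the absolute core flow (max 4 steps)."""
--
--     def category(step):
--         action = step['action']
--         if action == 'navigate':
--             return 'nav'
--         if action == 'type':
--             return 'form'
--         if action == 'click' and 'submit' in step.get('selector', '').lower():
--             return 'submit'
--         if action.startswith('assert_'):
--             return 'check'
--         return None
--
--     def message(step):
--         cat = category(step)
--         if cat == 'nav':
--             return "Go to the login page"
--         if cat == 'form':
--             return "Enter invalid login credentials"
--         if cat == 'submit':
--             return "Submit the form"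
--         if 'text' in step['action']:
--             return "Check error message contains '%s'" % step.get('value', 'error')
--         return "Verify error message appears"
--
--     # keep each step that is the first of its category, in encounter order
--     core = [message(s) for i, s in enumerate(steps)
--             if category(s) is not None
--             and all(category(t) != category(s) for t in steps[:i])]
--
--     if all(category(s) != 'nav' for s in steps):
--         core.insert(0, "Go to the application")
--     if all(category(s) != 'check' for s in steps) and len(core) < 4:
--         core.append("Verify error is shown")
--     return core[:4]
-- ===== Notes on version B (the rewrite author's own statement) =====
-- stated objective: alternative
-- what changed: B replaces A's stateful four-flag elif loop with break by a stateless classify-then-filter decomposition: a category function labels each step, a comprehension keeps every step that is the first of its category (checking the prefix), and the post-loop fixups test categories with all() instead of reading leftover flags.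
import Mathlib
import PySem

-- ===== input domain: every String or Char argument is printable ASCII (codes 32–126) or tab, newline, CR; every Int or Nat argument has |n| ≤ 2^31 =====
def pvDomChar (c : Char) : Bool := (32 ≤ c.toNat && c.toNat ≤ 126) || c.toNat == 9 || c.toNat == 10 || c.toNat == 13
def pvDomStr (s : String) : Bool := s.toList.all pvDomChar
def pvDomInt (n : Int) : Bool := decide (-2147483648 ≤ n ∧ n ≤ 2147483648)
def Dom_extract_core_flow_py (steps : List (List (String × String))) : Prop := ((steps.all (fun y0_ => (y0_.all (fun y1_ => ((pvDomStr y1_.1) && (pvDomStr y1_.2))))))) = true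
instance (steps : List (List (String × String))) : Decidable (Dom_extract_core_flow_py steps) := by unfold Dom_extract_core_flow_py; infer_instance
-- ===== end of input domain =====

-- B replaces A's stateful four-flag elif loop (with break) by a stateless classify-then-filter-firsts
-- decomposition of the same cost class; equivalence is proved on inputs whose steps all carry an 'action' key.


-- ===== PORT A =====
-- step['action']: KeyError (= get? none) is excluded by Pre_; the default "" is never reached inside Pre_.
def pvLoopA : List (List (String × String)) → List String → Bool → Bool → Bool → Bool →
    List String × Bool × Bool × Bool × Bool
  | [], core, hn, hf, hs, hv => (core, hn, hf, hs, hv)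
  | step :: rest, core, hn, hf, hs, hv =>
    let action := ((PySem.Dict.mk step).get? "action").getD ""
    let st : List String × Bool × Bool × Bool × Bool :=
      if action == "navigate" && !hn then
        (core ++ ["Go to the login page"], true, hf, hs, hv)
      else if action == "type" && !hf then
        (core ++ ["Enter invalid login credentials"], hn, true, hs, hv)
      else if action == "click" && PySem.Str.isIn "submit" (PySem.Str.lower ((PySem.Dict.mk step).getD "selector" "")) && !hs then
        (core ++ ["Submit the form"], hn, hf, true, hv)
      else if PySem.Str.startswith action "assert_" && !hv then
        ((if PySem.Str.isIn "text" action then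
            core ++ ["Check error message contains '" ++ (PySem.Dict.mk step).getD "value" "error" ++ "'"]
          else core ++ ["Verify error message appears"]), hn, hf, hs, true)
      else (core, hn, hf, hs, hv)
    if st.1.length ≥ 4 then st
    else pvLoopA rest st.1 st.2.1 st.2.2.1 st.2.2.2.1 st.2.2.2.2

def extract_core_flow_py (steps : List (List (String × String))) : List String :=
  let r := pvLoopA steps [] false false false false
  let core := r.1
  let core := if !r.2.1 then "Go to the application" :: core else core
  let core := if !r.2.2.2.2 && core.length < 4 then core ++ ["Verify error is shown"] else core
  PySem.List.slice core none (some 4)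

-- ===== PORT B =====
def pvCat (step : List (String × String)) : Option String :=
  let action := ((PySem.Dict.mk step).get? "action").getD ""
  if action == "navigate" then some "nav"
  else if action == "type" then some "form"
  else if action == "click" && PySem.Str.isIn "submit" (PySem.Str.lower ((PySem.Dict.mk step).getD "selector" "")) then some "submit"
  else if PySem.Str.startswith action "assert_" then some "check"
  else none

def pvMsg (step : List (String × String)) : String :=
  let cat := pvCat step
  if cat == some "nav" then "Go to the login page"
  else if cat == some "form" then "Enter invalid login credentials"
  else if cat == some "submit" then "Submit the form"
  else if PySem.Str.isIn "text" (((PySem.Dict.mk step).get? "action").getD "") then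
    "Check error message contains '" ++ (PySem.Dict.mk step).getD "value" "error" ++ "'"
  else "Verify error message appears"

def extract_core_flow_py_alt (steps : List (List (String × String))) : List String :=
  let core := ((PySem.List.enumerate steps).filter (fun p =>
      (pvCat p.2).isSome &&
        (PySem.List.slice steps none (some p.1)).all (fun t => !(pvCat t == pvCat p.2)))).map
    (fun p => pvMsg p.2)
  let core := if steps.all (fun s => !(pvCat s == some "nav")) then "Go to the application" :: core else core
  let core := if steps.all (fun s => !(pvCat s == some "check")) && core.length < 4 then core ++ ["Verify error is shown"] else core
  PySem.List.slice core none (some 4)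

-- ===== PRECONDITION & SPEC =====
-- Pre_ excludes exactly the steps without an 'action' key, on which Python A raises KeyError.
def Pre_extract_core_flow_py (steps : List (List (String × String))) : Prop :=
  steps.all (fun step => (PySem.Dict.mk step).contains "action") = true
instance (steps : List (List (String × String))) : Decidable (Pre_extract_core_flow_py steps) := by
  unfold Pre_extract_core_flow_py; infer_instance

def pvWitness_extract_core_flow_py : (List (List (String × String))) :=
  [[("action", "navigate")], [("action", "assert_text"), ("value", "bad login")]]

def Spec_extract_core_flow_py (steps : List (List (String × String))) (out : List String) : Prop := out = extract_core_flow_py_alt steps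
instance (steps : List (List (String × String))) (out : List String) : Decidable (Spec_extract_core_flow_py steps out) := by unfold Spec_extract_core_flow_py; infer_instance

-- ===== CLAIM (what is proved, stated in full; the proofs are below) =====
def Claim_equal_extract_core_flow_py : Prop := ∀ (steps : List (List (String × String))), Dom_extract_core_flow_py steps → Pre_extract_core_flow_py steps → Spec_extract_core_flow_py steps (extract_core_flow_py steps)

-- ===== LEMMAS AND PROOFS =====

-- common middle form: A's loop without accumulator and without break
def pvRef : List (List (String × String)) → Bool → Bool → Bool → Bool →
    List String × Bool × Bool × Bool × Bool
  | [], hn, hf, hs, hv => ([], hn, hf, hs, hv)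
  | step :: rest, hn, hf, hs, hv =>
    let action := ((PySem.Dict.mk step).get? "action").getD ""
    if action == "navigate" && !hn then
      let r := pvRef rest true hf hs hv
      ("Go to the login page" :: r.1, r.2)
    else if action == "type" && !hf then
      let r := pvRef rest hn true hs hv
      ("Enter invalid login credentials" :: r.1, r.2)
    else if action == "click" && PySem.Str.isIn "submit" (PySem.Str.lower ((PySem.Dict.mk step).getD "selector" "")) && !hs then
      let r := pvRef rest hn hf true hv
      ("Submit the form" :: r.1, r.2)
    else if PySem.Str.startswith action "assert_" && !hv then
      let r := pvRef rest hn hf hs true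
      ((if PySem.Str.isIn "text" action then
          "Check error message contains '" ++ (PySem.Dict.mk step).getD "value" "error" ++ "'"
        else "Verify error message appears") :: r.1, r.2)
    else pvRef rest hn hf hs hv

theorem pvRef_allTrue (steps : List (List (String × String))) :
    pvRef steps true true true true = ([], true, true, true, true) := by
  induction steps with
  | nil => rfl
  | cons s rest ih => simp [pvRef, ih]

theorem pvThreeFull (a b c : Bool) (h : 3 ≤ a.toNat + b.toNat + c.toNat) :
    a = true ∧ b = true ∧ c = true := by
  cases a <;> cases b <;> cases c <;> simp_all

theorem pvFlagsFull (hn hf hs hv : Bool)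
    (h : 4 ≤ hn.toNat + hf.toNat + hs.toNat + hv.toNat) :
    hn = true ∧ hf = true ∧ hs = true ∧ hv = true := by
  cases hn <;> cases hf <;> cases hs <;> cases hv <;> simp_all

theorem pvLoopA_eq_ref : ∀ (steps : List (List (String × String))) (core : List String)
    (hn hf hs hv : Bool), core.length = hn.toNat + hf.toNat + hs.toNat + hv.toNat →
    pvLoopA steps core hn hf hs hv =
      (core ++ (pvRef steps hn hf hs hv).1, (pvRef steps hn hf hs hv).2) := by
  intro steps
  induction steps with
  | nil => intro core hn hf hs hv h; simp [pvLoopA, pvRef]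
  | cons step rest ih =>
    intro core hn hf hs hv h
    simp only [pvLoopA, pvRef]
    split_ifs with h1 h2 h3 h4 h5 h6 h7 h8 h9 h10 h11
    · -- break fires: the three other flags must already be set
      simp only [Bool.and_eq_true, Bool.not_eq_true'] at h1
      obtain ⟨-, hfl⟩ := h1
      subst hfl
      simp only [List.length_append, List.length_cons, List.length_nil, ge_iff_le] at h2
      simp only [Bool.toNat_false, Bool.toNat_true] at h
      obtain ⟨ha, hb, hcc⟩ := pvThreeFull hf hs hv (by omega)
      subst ha; subst hb; subst hcc
      rw [pvRef_allTrue]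
      try simp
    · simp only [Bool.and_eq_true, Bool.not_eq_true'] at h1
      obtain ⟨-, hfl⟩ := h1
      subst hfl
      rw [ih _ _ _ _ _ (by
        simp only [List.length_append, List.length_cons, List.length_nil,
          Bool.toNat_false, Bool.toNat_true, h] <;> omega)]
      try simp [List.append_assoc]
    · -- break fires: the three other flags must already be set
      simp only [Bool.and_eq_true, Bool.not_eq_true'] at h3
      obtain ⟨-, hfl⟩ := h3
      subst hfl
      simp only [List.length_append, List.length_cons, List.length_nil, ge_iff_le] at h4
      simp only [Bool.toNat_false, Bool.toNat_true] at h
      obtain ⟨ha, hb, hcc⟩ := pvThreeFull hn hs hv (by omega)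
      subst ha; subst hb; subst hcc
      rw [pvRef_allTrue]
      try simp
    · simp only [Bool.and_eq_true, Bool.not_eq_true'] at h3
      obtain ⟨-, hfl⟩ := h3
      subst hfl
      rw [ih _ _ _ _ _ (by
        simp only [List.length_append, List.length_cons, List.length_nil,
          Bool.toNat_false, Bool.toNat_true, h] <;> omega)]
      try simp [List.append_assoc]
    · -- break fires: the three other flags must already be set
      simp only [Bool.and_eq_true, Bool.not_eq_true'] at h5
      obtain ⟨⟨-, -⟩, hfl⟩ := h5
      subst hfl
      simp only [List.length_append, List.length_cons, List.length_nil, ge_iff_le] at h6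
      simp only [Bool.toNat_false, Bool.toNat_true] at h
      obtain ⟨ha, hb, hcc⟩ := pvThreeFull hn hf hv (by omega)
      subst ha; subst hb; subst hcc
      rw [pvRef_allTrue]
      try simp
    · simp only [Bool.and_eq_true, Bool.not_eq_true'] at h5
      obtain ⟨⟨-, -⟩, hfl⟩ := h5
      subst hfl
      rw [ih _ _ _ _ _ (by
        simp only [List.length_append, List.length_cons, List.length_nil,
          Bool.toNat_false, Bool.toNat_true, h] <;> omega)]
      try simp [List.append_assoc]
    · -- break fires: the three other flags must already be set
      simp only [Bool.and_eq_true, Bool.not_eq_true'] at h7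
      obtain ⟨-, hfl⟩ := h7
      subst hfl
      simp only [List.length_append, List.length_cons, List.length_nil, ge_iff_le] at h9
      simp only [Bool.toNat_false, Bool.toNat_true] at h
      obtain ⟨ha, hb, hcc⟩ := pvThreeFull hn hf hs (by omega)
      subst ha; subst hb; subst hcc
      rw [pvRef_allTrue]
      try simp
    · simp only [Bool.and_eq_true, Bool.not_eq_true'] at h7
      obtain ⟨-, hfl⟩ := h7
      subst hfl
      rw [ih _ _ _ _ _ (by
        simp only [List.length_append, List.length_cons, List.length_nil,
          Bool.toNat_false, Bool.toNat_true, h] <;> omega)]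
      try simp [List.append_assoc]
    · -- break fires: the three other flags must already be set
      simp only [Bool.and_eq_true, Bool.not_eq_true'] at h7
      obtain ⟨-, hfl⟩ := h7
      subst hfl
      simp only [List.length_append, List.length_cons, List.length_nil, ge_iff_le] at h10
      simp only [Bool.toNat_false, Bool.toNat_true] at h
      obtain ⟨ha, hb, hcc⟩ := pvThreeFull hn hf hs (by omega)
      subst ha; subst hb; subst hcc
      rw [pvRef_allTrue]
      try simp
    · simp only [Bool.and_eq_true, Bool.not_eq_true'] at h7
      obtain ⟨-, hfl⟩ := h7
      subst hfl
      rw [ih _ _ _ _ _ (by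
        simp only [List.length_append, List.length_cons, List.length_nil,
          Bool.toNat_false, Bool.toNat_true, h] <;> omega)]
      try simp [List.append_assoc]
    · -- else branch, break fires: all four flags set
      simp only [ge_iff_le] at h11
      obtain ⟨ha, hb, hcc, hd⟩ := pvFlagsFull hn hf hs hv (by omega)
      subst ha; subst hb; subst hcc; subst hd
      rw [pvRef_allTrue]
      try simp
    · exact ih core hn hf hs hv h

def pvPreScan : List (List (String × String)) → List (List (String × String)) → List String
  | _, [] => []
  | pre, s :: suf =>
    if (pvCat s).isSome && pre.all (fun t => !(pvCat t == pvCat s)) then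
      pvMsg s :: pvPreScan (pre ++ [s]) suf
    else pvPreScan (pre ++ [s]) suf

theorem pvEnum_eq_preScan : ∀ (suf pre : List (List (String × String))),
    ((PySem.List.enumerate suf (pre.length : Int)).filter (fun p =>
        (pvCat p.2).isSome &&
          (PySem.List.slice (pre ++ suf) none (some p.1)).all (fun t => !(pvCat t == pvCat p.2)))).map
      (fun p => pvMsg p.2) = pvPreScan pre suf := by
  intro suf
  induction suf with
  | nil => intro pre; simp [pvPreScan, PySem.List.enumerate]
  | cons s suf ih =>
    intro pre
    have hsl : PySem.List.slice (pre ++ s :: suf) none (some ((pre.length : Int))) = pre := by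
      rw [PySem.List.slice_to_natCast]
      simpa using List.take_left pre
    have hrest := ih (pre ++ [s])
    simp only [List.append_assoc, List.cons_append, List.nil_append, List.length_append,
      List.length_cons, List.length_nil, Nat.add_zero, Nat.cast_add, Nat.cast_one, Nat.cast_zero, zero_add] at hrest
    simp only [PySem.List.enumerate_cons, List.filter_cons]
    rw [hsl]
    by_cases hc : ((pvCat s).isSome && pre.all fun t => !(pvCat t == pvCat s)) = true
    · simp only [hc, if_true, List.map_cons, pvPreScan, hrest]
    · simp only [hc, Bool.false_eq_true, if_false, pvPreScan]
      exact hrest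

theorem pvAllNot {α : Type} (l : List α) (p : α → Bool) :
    (l.all fun t => !(p t)) = !(l.any p) := by
  induction l <;> simp_all

theorem pvCat_nav (s : List (String × String))
    (h : (((PySem.Dict.mk s).get? "action").getD "" == "navigate") = true) :
    pvCat s = some "nav" := by
  simp [pvCat, eq_of_beq h]

theorem pvCat_form (s : List (String × String))
    (h : (((PySem.Dict.mk s).get? "action").getD "" == "type") = true) :
    pvCat s = some "form" := by
  simp [pvCat, eq_of_beq h]

theorem pvCat_sub (s : List (String × String))
    (h : (((PySem.Dict.mk s).get? "action").getD "" == "click" &&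
      PySem.Str.isIn "submit" (PySem.Str.lower ((PySem.Dict.mk s).getD "selector" ""))) = true) :
    pvCat s = some "submit" := by
  obtain ⟨h1, h2⟩ := Bool.and_eq_true_iff.mp h
  simp [pvCat, eq_of_beq h1]
  simpa using h2

theorem pvCat_check (s : List (String × String))
    (h : PySem.Str.startswith (((PySem.Dict.mk s).get? "action").getD "") "assert_" = true) :
    pvCat s = some "check" := by
  simp only [pvCat]
  split_ifs with a b c
  · rw [eq_of_beq a] at h; exact absurd h (by decide)
  · rw [eq_of_beq b] at h; exact absurd h (by decide)
  · rw [eq_of_beq (Bool.and_eq_true_iff.mp c).1] at h; exact absurd h (by decide)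
  · rfl

theorem pvCat_none (s : List (String × String))
    (h1 : ¬ (((PySem.Dict.mk s).get? "action").getD "" == "navigate") = true)
    (h2 : ¬ (((PySem.Dict.mk s).get? "action").getD "" == "type") = true)
    (h3 : ¬ (((PySem.Dict.mk s).get? "action").getD "" == "click" &&
      PySem.Str.isIn "submit" (PySem.Str.lower ((PySem.Dict.mk s).getD "selector" ""))) = true)
    (h4 : ¬ PySem.Str.startswith (((PySem.Dict.mk s).get? "action").getD "") "assert_" = true) :
    pvCat s = none := by
  simp only [pvCat]
  rw [if_neg h1, if_neg h2, if_neg h3, if_neg h4]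

theorem pvRef_flags : ∀ (steps : List (List (String × String))) (hn hf hs hv : Bool),
    (pvRef steps hn hf hs hv).2 =
      ((hn || steps.any (fun s => pvCat s == some "nav")),
       (hf || steps.any (fun s => pvCat s == some "form")),
       (hs || steps.any (fun s => pvCat s == some "submit")),
       (hv || steps.any (fun s => pvCat s == some "check"))) := by
  intro steps
  induction steps with
  | nil => intro hn hf hs hv; simp [pvRef]
  | cons s rest ih =>
    intro hn hf hs hv
    simp only [pvRef]
    by_cases h1 : (((PySem.Dict.mk s).get? "action").getD "" == "navigate") = true
    · have hc := pvCat_nav s h1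
      rw [eq_of_beq h1]
      have hsw : PySem.Chars.startswith ['n', 'a', 'v', 'i', 'g', 'a', 't', 'e'] ['a', 's', 's', 'e', 'r', 't', '_'] = false := by decide
      cases hn <;> (simp [hsw]; rw [ih]; simp [hc])
    · by_cases h2 : (((PySem.Dict.mk s).get? "action").getD "" == "type") = true
      · have hc := pvCat_form s h2
        rw [eq_of_beq h2]
        have hsw : PySem.Chars.startswith ['t', 'y', 'p', 'e'] ['a', 's', 's', 'e', 'r', 't', '_'] = false := by decide
        cases hf <;> (simp [hsw]; rw [ih]; simp [hc])
      · by_cases h3 : (((PySem.Dict.mk s).get? "action").getD "" == "click" &&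
          PySem.Str.isIn "submit" (PySem.Str.lower ((PySem.Dict.mk s).getD "selector" ""))) = true
        · have hc := pvCat_sub s h3
          obtain ⟨h3a, h3b⟩ := Bool.and_eq_true_iff.mp h3
          rw [eq_of_beq h3a]
          simp at h3b
          have hsw : PySem.Chars.startswith ['c', 'l', 'i', 'c', 'k'] ['a', 's', 's', 'e', 'r', 't', '_'] = false := by decide
          cases hs <;> (simp [hsw, h3b]; rw [ih]; simp [hc])
        · by_cases h4 : PySem.Str.startswith (((PySem.Dict.mk s).get? "action").getD "") "assert_" = true
          · have hc := pvCat_check s h4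
            have hne : (((PySem.Dict.mk s).get? "action").getD "") ≠ "click" := by
              intro he; rw [he] at h4; exact absurd h4 (by decide)
            simp only [Bool.not_eq_true] at h1 h2
            simp at h1 h2 h4
            cases hv <;> (simp [h1, h2, hne, h4]; rw [ih]; simp [hc])
          · have hc := pvCat_none s h1 h2 h3 h4
            simp only [Bool.not_eq_true] at h1 h2 h3 h4
            simp at h1 h2 h3 h4
            by_cases hck : (((PySem.Dict.mk s).get? "action").getD "") = "click"
            · have hsw2 : PySem.Chars.startswith ['c', 'l', 'i', 'c', 'k'] ['a', 's', 's', 'e', 'r', 't', '_'] = false := by decide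
              simp [h1, h2, h4, hck, h3 hck, hsw2]; rw [ih]; simp [hc]
            · simp [h1, h2, h4, hck]; rw [ih]; simp [hc]

theorem pvRef_flag_nav (steps : List (List (String × String))) (hn hf hs hv : Bool) :
    (pvRef steps hn hf hs hv).2.1 = (hn || steps.any (fun s => pvCat s == some "nav")) := by
  rw [pvRef_flags]

theorem pvRef_flag_check (steps : List (List (String × String))) (hn hf hs hv : Bool) :
    (pvRef steps hn hf hs hv).2.2.2.2 = (hv || steps.any (fun s => pvCat s == some "check")) := by
  rw [pvRef_flags]

theorem pvPreScan_eq_ref : ∀ (suf pre : List (List (String × String))),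
    pvPreScan pre suf =
      (pvRef suf (pre.any (fun t => pvCat t == some "nav")) (pre.any (fun t => pvCat t == some "form"))
        (pre.any (fun t => pvCat t == some "submit")) (pre.any (fun t => pvCat t == some "check"))).1 := by
  intro suf
  induction suf with
  | nil => intro pre; simp [pvPreScan, pvRef]
  | cons s suf ih =>
    intro pre
    simp only [pvPreScan, pvRef]
    by_cases h1 : (((PySem.Dict.mk s).get? "action").getD "" == "navigate") = true
    · have hc := pvCat_nav s h1
      rw [eq_of_beq h1]
      have hsw : PySem.Chars.startswith ['n', 'a', 'v', 'i', 'g', 'a', 't', 'e'] ['a', 's', 's', 'e', 'r', 't', '_'] = false := by decide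
      by_cases hn : (pre.any fun t => pvCat t == some "nav") = true <;>
        (simp [hsw, hc, pvAllNot, hn, pvMsg]; rw [ih]; simp [List.any_append, hc])
    · by_cases h2 : (((PySem.Dict.mk s).get? "action").getD "" == "type") = true
      · have hc := pvCat_form s h2
        rw [eq_of_beq h2]
        have hsw : PySem.Chars.startswith ['t', 'y', 'p', 'e'] ['a', 's', 's', 'e', 'r', 't', '_'] = false := by decide
        by_cases hf : (pre.any fun t => pvCat t == some "form") = true <;>
          (simp [hsw, hc, pvAllNot, hf, pvMsg]; rw [ih]; simp [List.any_append, hc])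
      · by_cases h3 : (((PySem.Dict.mk s).get? "action").getD "" == "click" &&
          PySem.Str.isIn "submit" (PySem.Str.lower ((PySem.Dict.mk s).getD "selector" ""))) = true
        · have hc := pvCat_sub s h3
          obtain ⟨h3a, h3b⟩ := Bool.and_eq_true_iff.mp h3
          rw [eq_of_beq h3a]
          simp at h3b
          have hsw : PySem.Chars.startswith ['c', 'l', 'i', 'c', 'k'] ['a', 's', 's', 'e', 'r', 't', '_'] = false := by decide
          by_cases hs : (pre.any fun t => pvCat t == some "submit") = true <;>
            (simp [hsw, h3b, hc, pvAllNot, hs, pvMsg]; rw [ih]; simp [List.any_append, hc])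
        · by_cases h4 : PySem.Str.startswith (((PySem.Dict.mk s).get? "action").getD "") "assert_" = true
          · have hc := pvCat_check s h4
            have hne : (((PySem.Dict.mk s).get? "action").getD "") ≠ "click" := by
              intro he; rw [he] at h4; exact absurd h4 (by decide)
            simp only [Bool.not_eq_true] at h1 h2
            simp at h1 h2 h4
            by_cases hv : (pre.any fun t => pvCat t == some "check") = true <;>
              (simp [h1, h2, hne, h4, hc, pvAllNot, hv, pvMsg]; rw [ih]; simp [List.any_append, hc])
          · have hc := pvCat_none s h1 h2 h3 h4
            simp only [Bool.not_eq_true] at h1 h2 h3 h4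
            simp at h1 h2 h3 h4
            by_cases hck : (((PySem.Dict.mk s).get? "action").getD "") = "click"
            · have hsw2 : PySem.Chars.startswith ['c', 'l', 'i', 'c', 'k'] ['a', 's', 's', 'e', 'r', 't', '_'] = false := by decide
              simp [h1, h2, h4, hck, h3 hck, hsw2, hc, pvAllNot]; rw [ih]; simp [List.any_append, hc]
            · simp [h1, h2, h4, hck, hc, pvAllNot]; rw [ih]; simp [List.any_append, hc]

-- ===== VERDICT (by name: the statement is the Claim_ definition above) =====
theorem extract_core_flow_py_spec : Claim_equal_extract_core_flow_py := by
  intro steps _ _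
  unfold Spec_extract_core_flow_py extract_core_flow_py extract_core_flow_py_alt
  rw [pvLoopA_eq_ref steps [] false false false false rfl]
  have hb := pvEnum_eq_preScan steps []
  simp only [List.length_nil, Nat.cast_zero, List.nil_append] at hb
  rw [pvPreScan_eq_ref steps []] at hb
  simp only [List.any_nil] at hb
  simp only [pvAllNot] at hb
  simp only [hb, pvRef_flag_nav, pvRef_flag_check, Bool.false_or, List.nil_append, pvAllNot]
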